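-- pv_equiv track=rewrite | github.com/qq8588699/SABR-project | tenor_utils.py | _resolve_convention
-- ===== SOURCE A (Python) =====
-- _SUPPORTED_CONVENTIONS = ("ACT/360", "ACT/365", "ACT/ACT", "30/360", "BUS/252")
--
-- _CONV_ALIASES = {
--     "ACT360": "ACT/360", "ACTUAL360": "ACT/360", "ACTUAL/360": "ACT/360",
--     "ACT365": "ACT/365", "ACTUAL365": "ACT/365", "ACTUAL/365": "ACT/365",
--     "ACTACT": "ACT/ACT", "ACTUALACTUAL": "ACT/ACT", "ACTUAL/ACTUAL": "ACT/ACT",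
--     "ACTACTISDA": "ACT/ACT",
--     "30360": "30/360", "BONDBASIS": "30/360",
--     "BUS252": "BUS/252", "BUSINESS252": "BUS/252",
-- }
--
-- def _resolve_convention(s: str) -> str:
--     key = s.strip().upper()
--     for canon in _SUPPORTED_CONVENTIONS:
--         if key == canon:
--             return canon
--     norm = key.replace("/","").replace(" ","")
--     for canon in _SUPPORTED_CONVENTIONS:
--         if norm == canon.replace("/","").replace(" ",""):
--             return canon
--     if norm in _CONV_ALIASES:
--         return _CONV_ALIASES[norm]
--     for alias, canon in _CONV_ALIASES.items():
--         if norm == alias.replace("/","").replace(" ",""):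
--             return canon
--     raise ValueError(
--         f"Unknown convention '{s}'. Supported: {list(_SUPPORTED_CONVENTIONS)}"
--     )
-- ===== SOURCE B (Python) =====
-- _SUPPORTED_CONVENTIONS = ("ACT/360", "ACT/365", "ACT/ACT", "30/360", "BUS/252")
--
-- _CONV_ALIASES = {
--     "ACT360": "ACT/360", "ACTUAL360": "ACT/360", "ACTUAL/360": "ACT/360",
--     "ACT365": "ACT/365", "ACTUAL365": "ACT/365", "ACTUAL/365": "ACT/365",
--     "ACTACT": "ACT/ACT", "ACTUALACTUAL": "ACT/ACT", "ACTUAL/ACTUAL": "ACT/ACT",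
--     "ACTACTISDA": "ACT/ACT",
--     "30360": "30/360", "BONDBASIS": "30/360",
--     "BUS252": "BUS/252", "BUSINESS252": "BUS/252",
-- }
--
-- _LOOKUP = {}
-- for _canon in _SUPPORTED_CONVENTIONS:
--     _LOOKUP[_canon.replace("/", "").replace(" ", "")] = _canon
-- for _alias, _canon in _CONV_ALIASES.items():
--     _LOOKUP[_alias.replace("/", "").replace(" ", "")] = _canon
--
-- def _resolve_convention(s: str) -> str:
--     norm = s.strip().upper().replace("/", "").replace(" ", "")
--     try:
--         return _LOOKUP[norm]
--     except KeyError: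
--         raise ValueError(
--             f"Unknown convention '{s}'. Supported: {list(_SUPPORTED_CONVENTIONS)}"
--         )
-- ===== Notes on version B (the rewrite author's own statement) =====
-- stated objective: simpler
-- what changed: A's four sequential scans (exact-match loop over the canonical tuple, normalized-match loop, alias dict probe, normalized loop over alias items) are replaced by one module-level lookup table keyed by normalized form, consulted once per call.
import Mathlib
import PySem

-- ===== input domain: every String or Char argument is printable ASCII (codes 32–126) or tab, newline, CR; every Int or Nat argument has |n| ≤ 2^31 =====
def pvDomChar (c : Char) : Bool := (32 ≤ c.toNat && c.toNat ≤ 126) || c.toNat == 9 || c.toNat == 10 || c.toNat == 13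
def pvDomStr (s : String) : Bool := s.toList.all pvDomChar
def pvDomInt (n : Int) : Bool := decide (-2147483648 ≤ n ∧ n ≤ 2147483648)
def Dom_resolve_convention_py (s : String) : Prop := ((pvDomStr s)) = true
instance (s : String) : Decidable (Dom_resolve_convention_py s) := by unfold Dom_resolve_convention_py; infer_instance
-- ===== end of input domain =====

-- B replaces A's four sequential scans (two loops over the canonical tuple, a dict probe and
-- a loop over the aliases) by one precomputed lookup table from normalized form to canonical
-- convention, consulted once (objective: simpler).

-- shared module-level tables and the normalization x.replace("/","").replace(" ","")
-- ===== PORT A =====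
def pvSupported : List String := ["ACT/360", "ACT/365", "ACT/ACT", "30/360", "BUS/252"]

def pvAliases : List (String × String) :=
  [("ACT360", "ACT/360"), ("ACTUAL360", "ACT/360"), ("ACTUAL/360", "ACT/360"),
   ("ACT365", "ACT/365"), ("ACTUAL365", "ACT/365"), ("ACTUAL/365", "ACT/365"),
   ("ACTACT", "ACT/ACT"), ("ACTUALACTUAL", "ACT/ACT"), ("ACTUAL/ACTUAL", "ACT/ACT"),
   ("ACTACTISDA", "ACT/ACT"),
   ("30360", "30/360"), ("BONDBASIS", "30/360"),
   ("BUS252", "BUS/252"), ("BUSINESS252", "BUS/252")]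

-- x.replace("/","").replace(" ","")
def pvNormalize (t : String) : String :=
  PySem.Str.replace (PySem.Str.replace t "/" "") " " ""

-- first loop of A: for canon in _SUPPORTED_CONVENTIONS: if key == canon: return canon
def pvLoop1 (key : String) : List String → Option String
  | [] => none
  | c :: cs => if key == c then some c else pvLoop1 key cs

-- second loop of A
def pvLoop2 (norm : String) : List String → Option String
  | [] => none
  | c :: cs => if norm == pvNormalize c then some c else pvLoop2 norm cs

-- third loop of A (over _CONV_ALIASES.items())
def pvLoop3 (norm : String) : List (String × String) → Option String
  | [] => none
  | (a, c) :: rest => if norm == pvNormalize a then some c else pvLoop3 norm rest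

-- everything A does after the first loop missed (the final 'raise' is excluded by Pre_; "" stands in)
def pvStage2 (norm : String) : String :=
  match pvLoop2 norm pvSupported with
  | some c => c
  | none =>
    match (PySem.Dict.ofList pvAliases).get? norm with
    | some c => c
    | none =>
      match pvLoop3 norm pvAliases with
      | some c => c
      | none => ""

def resolve_convention_py (s : String) : String :=
  let key := PySem.Str.upper (PySem.Str.strip s)
  match pvLoop1 key pvSupported with
  | some c => c
  | none => pvStage2 (pvNormalize key)

-- ===== PORT B =====
-- module-level table: canonical forms first, then the aliases, keyed by their normalized form
def pvLookupB : PySem.Dict String String :=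
  pvAliases.foldl (fun d p => d.insert (pvNormalize p.1) p.2)
    (pvSupported.foldl (fun d c => d.insert (pvNormalize c) c) PySem.Dict.empty)

def resolve_convention_py_alt (s : String) : String :=
  let norm := PySem.Str.replace (PySem.Str.replace (PySem.Str.upper (PySem.Str.strip s)) "/" "") " " ""
  match pvLookupB.get? norm with
  | some c => c
  | none => ""   -- ValueError in Source B; excluded by Pre_

-- ===== PRECONDITION & SPEC =====
-- Pre_ excludes exactly the inputs on which A (and B) raise ValueError: those whose
-- stripped/uppercased/de-slashed/de-spaced form is not a recognised convention key.
def Pre_resolve_convention_py (s : String) : Prop :=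
  (PySem.Str.replace (PySem.Str.replace (PySem.Str.upper (PySem.Str.strip s)) "/" "") " " "") ∈
    (["ACT360", "ACTUAL360", "ACT365", "ACTUAL365", "ACTACT", "ACTUALACTUAL",
      "ACTACTISDA", "30360", "BONDBASIS", "BUS252", "BUSINESS252"] : List String)
instance (s : String) : Decidable (Pre_resolve_convention_py s) := by
  unfold Pre_resolve_convention_py; infer_instance

def pvWitness_resolve_convention_py : String := " act/360 "

def Spec_resolve_convention_py (s : String) (out : String) : Prop := out = resolve_convention_py_alt s
instance (s : String) (out : String) : Decidable (Spec_resolve_convention_py s out) := by unfold Spec_resolve_convention_py; infer_instance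

-- ===== CLAIM (what is proved, stated in full; the proofs are below) =====
def Claim_equal_resolve_convention_py : Prop := ∀ (s : String), Dom_resolve_convention_py s → Pre_resolve_convention_py s → Spec_resolve_convention_py s (resolve_convention_py s)

-- ===== LEMMAS AND PROOFS =====

-- ground evaluations of the normalizer and of the 19 table-building insert steps (one tiny decide each)
theorem pvN1 : pvNormalize "ACT/360" = "ACT360" := by decide
theorem pvN2 : pvNormalize "ACT/365" = "ACT365" := by decide
theorem pvN3 : pvNormalize "ACT/ACT" = "ACTACT" := by decide
theorem pvN4 : pvNormalize "30/360" = "30360" := by decide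
theorem pvN5 : pvNormalize "BUS/252" = "BUS252" := by decide
theorem pvN6 : pvNormalize "ACT360" = "ACT360" := by decide
theorem pvN7 : pvNormalize "ACTUAL360" = "ACTUAL360" := by decide
theorem pvN8 : pvNormalize "ACTUAL/360" = "ACTUAL360" := by decide
theorem pvN9 : pvNormalize "ACT365" = "ACT365" := by decide
theorem pvN10 : pvNormalize "ACTUAL365" = "ACTUAL365" := by decide
theorem pvN11 : pvNormalize "ACTUAL/365" = "ACTUAL365" := by decide
theorem pvN12 : pvNormalize "ACTACT" = "ACTACT" := by decide
theorem pvN13 : pvNormalize "ACTUALACTUAL" = "ACTUALACTUAL" := by decide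
theorem pvN14 : pvNormalize "ACTUAL/ACTUAL" = "ACTUALACTUAL" := by decide
theorem pvN15 : pvNormalize "ACTACTISDA" = "ACTACTISDA" := by decide
theorem pvN16 : pvNormalize "30360" = "30360" := by decide
theorem pvN17 : pvNormalize "BONDBASIS" = "BONDBASIS" := by decide
theorem pvN18 : pvNormalize "BUS252" = "BUS252" := by decide
theorem pvN19 : pvNormalize "BUSINESS252" = "BUSINESS252" := by decide
theorem pvS1 : (PySem.Dict.empty).insert "ACT360" "ACT/360" = PySem.Dict.mk [("ACT360", "ACT/360")] := by decide
theorem pvS2 : (PySem.Dict.mk [("ACT360", "ACT/360")]).insert "ACT365" "ACT/365" = PySem.Dict.mk [("ACT360", "ACT/360"), ("ACT365", "ACT/365")] := by decide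
theorem pvS3 : (PySem.Dict.mk [("ACT360", "ACT/360"), ("ACT365", "ACT/365")]).insert "ACTACT" "ACT/ACT" = PySem.Dict.mk [("ACT360", "ACT/360"), ("ACT365", "ACT/365"), ("ACTACT", "ACT/ACT")] := by decide
theorem pvS4 : (PySem.Dict.mk [("ACT360", "ACT/360"), ("ACT365", "ACT/365"), ("ACTACT", "ACT/ACT")]).insert "30360" "30/360" = PySem.Dict.mk [("ACT360", "ACT/360"), ("ACT365", "ACT/365"), ("ACTACT", "ACT/ACT"), ("30360", "30/360")] := by decide
theorem pvS5 : (PySem.Dict.mk [("ACT360", "ACT/360"), ("ACT365", "ACT/365"), ("ACTACT", "ACT/ACT"), ("30360", "30/360")]).insert "BUS252" "BUS/252" = PySem.Dict.mk [("ACT360", "ACT/360"), ("ACT365", "ACT/365"), ("ACTACT", "ACT/ACT"), ("30360", "30/360"), ("BUS252", "BUS/252")] := by decide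
theorem pvS6 : (PySem.Dict.mk [("ACT360", "ACT/360"), ("ACT365", "ACT/365"), ("ACTACT", "ACT/ACT"), ("30360", "30/360"), ("BUS252", "BUS/252")]).insert "ACT360" "ACT/360" = PySem.Dict.mk [("ACT360", "ACT/360"), ("ACT365", "ACT/365"), ("ACTACT", "ACT/ACT"), ("30360", "30/360"), ("BUS252", "BUS/252")] := by decide
theorem pvS7 : (PySem.Dict.mk [("ACT360", "ACT/360"), ("ACT365", "ACT/365"), ("ACTACT", "ACT/ACT"), ("30360", "30/360"), ("BUS252", "BUS/252")]).insert "ACTUAL360" "ACT/360" = PySem.Dict.mk [("ACT360", "ACT/360"), ("ACT365", "ACT/365"), ("ACTACT", "ACT/ACT"), ("30360", "30/360"), ("BUS252", "BUS/252"), ("ACTUAL360", "ACT/360")] := by decide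
theorem pvS8 : (PySem.Dict.mk [("ACT360", "ACT/360"), ("ACT365", "ACT/365"), ("ACTACT", "ACT/ACT"), ("30360", "30/360"), ("BUS252", "BUS/252"), ("ACTUAL360", "ACT/360")]).insert "ACTUAL360" "ACT/360" = PySem.Dict.mk [("ACT360", "ACT/360"), ("ACT365", "ACT/365"), ("ACTACT", "ACT/ACT"), ("30360", "30/360"), ("BUS252", "BUS/252"), ("ACTUAL360", "ACT/360")] := by decide
theorem pvS9 : (PySem.Dict.mk [("ACT360", "ACT/360"), ("ACT365", "ACT/365"), ("ACTACT", "ACT/ACT"), ("30360", "30/360"), ("BUS252", "BUS/252"), ("ACTUAL360", "ACT/360")]).insert "ACT365" "ACT/365" = PySem.Dict.mk [("ACT360", "ACT/360"), ("ACT365", "ACT/365"), ("ACTACT", "ACT/ACT"), ("30360", "30/360"), ("BUS252", "BUS/252"), ("ACTUAL360", "ACT/360")] := by decide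
theorem pvS10 : (PySem.Dict.mk [("ACT360", "ACT/360"), ("ACT365", "ACT/365"), ("ACTACT", "ACT/ACT"), ("30360", "30/360"), ("BUS252", "BUS/252"), ("ACTUAL360", "ACT/360")]).insert "ACTUAL365" "ACT/365" = PySem.Dict.mk [("ACT360", "ACT/360"), ("ACT365", "ACT/365"), ("ACTACT", "ACT/ACT"), ("30360", "30/360"), ("BUS252", "BUS/252"), ("ACTUAL360", "ACT/360"), ("ACTUAL365", "ACT/365")] := by decide
theorem pvS11 : (PySem.Dict.mk [("ACT360", "ACT/360"), ("ACT365", "ACT/365"), ("ACTACT", "ACT/ACT"), ("30360", "30/360"), ("BUS252", "BUS/252"), ("ACTUAL360", "ACT/360"), ("ACTUAL365", "ACT/365")]).insert "ACTUAL365" "ACT/365" = PySem.Dict.mk [("ACT360", "ACT/360"), ("ACT365", "ACT/365"), ("ACTACT", "ACT/ACT"), ("30360", "30/360"), ("BUS252", "BUS/252"), ("ACTUAL360", "ACT/360"), ("ACTUAL365", "ACT/365")] := by decide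
theorem pvS12 : (PySem.Dict.mk [("ACT360", "ACT/360"), ("ACT365", "ACT/365"), ("ACTACT", "ACT/ACT"), ("30360", "30/360"), ("BUS252", "BUS/252"), ("ACTUAL360", "ACT/360"), ("ACTUAL365", "ACT/365")]).insert "ACTACT" "ACT/ACT" = PySem.Dict.mk [("ACT360", "ACT/360"), ("ACT365", "ACT/365"), ("ACTACT", "ACT/ACT"), ("30360", "30/360"), ("BUS252", "BUS/252"), ("ACTUAL360", "ACT/360"), ("ACTUAL365", "ACT/365")] := by decide
theorem pvS13 : (PySem.Dict.mk [("ACT360", "ACT/360"), ("ACT365", "ACT/365"), ("ACTACT", "ACT/ACT"), ("30360", "30/360"), ("BUS252", "BUS/252"), ("ACTUAL360", "ACT/360"), ("ACTUAL365", "ACT/365")]).insert "ACTUALACTUAL" "ACT/ACT" = PySem.Dict.mk [("ACT360", "ACT/360"), ("ACT365", "ACT/365"), ("ACTACT", "ACT/ACT"), ("30360", "30/360"), ("BUS252", "BUS/252"), ("ACTUAL360", "ACT/360"), ("ACTUAL365", "ACT/365"), ("ACTUALACTUAL", "ACT/ACT")] := by decide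
theorem pvS14 : (PySem.Dict.mk [("ACT360", "ACT/360"), ("ACT365", "ACT/365"), ("ACTACT", "ACT/ACT"), ("30360", "30/360"), ("BUS252", "BUS/252"), ("ACTUAL360", "ACT/360"), ("ACTUAL365", "ACT/365"), ("ACTUALACTUAL", "ACT/ACT")]).insert "ACTUALACTUAL" "ACT/ACT" = PySem.Dict.mk [("ACT360", "ACT/360"), ("ACT365", "ACT/365"), ("ACTACT", "ACT/ACT"), ("30360", "30/360"), ("BUS252", "BUS/252"), ("ACTUAL360", "ACT/360"), ("ACTUAL365", "ACT/365"), ("ACTUALACTUAL", "ACT/ACT")] := by decide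
theorem pvS15 : (PySem.Dict.mk [("ACT360", "ACT/360"), ("ACT365", "ACT/365"), ("ACTACT", "ACT/ACT"), ("30360", "30/360"), ("BUS252", "BUS/252"), ("ACTUAL360", "ACT/360"), ("ACTUAL365", "ACT/365"), ("ACTUALACTUAL", "ACT/ACT")]).insert "ACTACTISDA" "ACT/ACT" = PySem.Dict.mk [("ACT360", "ACT/360"), ("ACT365", "ACT/365"), ("ACTACT", "ACT/ACT"), ("30360", "30/360"), ("BUS252", "BUS/252"), ("ACTUAL360", "ACT/360"), ("ACTUAL365", "ACT/365"), ("ACTUALACTUAL", "ACT/ACT"), ("ACTACTISDA", "ACT/ACT")] := by decide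
theorem pvS16 : (PySem.Dict.mk [("ACT360", "ACT/360"), ("ACT365", "ACT/365"), ("ACTACT", "ACT/ACT"), ("30360", "30/360"), ("BUS252", "BUS/252"), ("ACTUAL360", "ACT/360"), ("ACTUAL365", "ACT/365"), ("ACTUALACTUAL", "ACT/ACT"), ("ACTACTISDA", "ACT/ACT")]).insert "30360" "30/360" = PySem.Dict.mk [("ACT360", "ACT/360"), ("ACT365", "ACT/365"), ("ACTACT", "ACT/ACT"), ("30360", "30/360"), ("BUS252", "BUS/252"), ("ACTUAL360", "ACT/360"), ("ACTUAL365", "ACT/365"), ("ACTUALACTUAL", "ACT/ACT"), ("ACTACTISDA", "ACT/ACT")] := by decide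
theorem pvS17 : (PySem.Dict.mk [("ACT360", "ACT/360"), ("ACT365", "ACT/365"), ("ACTACT", "ACT/ACT"), ("30360", "30/360"), ("BUS252", "BUS/252"), ("ACTUAL360", "ACT/360"), ("ACTUAL365", "ACT/365"), ("ACTUALACTUAL", "ACT/ACT"), ("ACTACTISDA", "ACT/ACT")]).insert "BONDBASIS" "30/360" = PySem.Dict.mk [("ACT360", "ACT/360"), ("ACT365", "ACT/365"), ("ACTACT", "ACT/ACT"), ("30360", "30/360"), ("BUS252", "BUS/252"), ("ACTUAL360", "ACT/360"), ("ACTUAL365", "ACT/365"), ("ACTUALACTUAL", "ACT/ACT"), ("ACTACTISDA", "ACT/ACT"), ("BONDBASIS", "30/360")] := by decide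
theorem pvS18 : (PySem.Dict.mk [("ACT360", "ACT/360"), ("ACT365", "ACT/365"), ("ACTACT", "ACT/ACT"), ("30360", "30/360"), ("BUS252", "BUS/252"), ("ACTUAL360", "ACT/360"), ("ACTUAL365", "ACT/365"), ("ACTUALACTUAL", "ACT/ACT"), ("ACTACTISDA", "ACT/ACT"), ("BONDBASIS", "30/360")]).insert "BUS252" "BUS/252" = PySem.Dict.mk [("ACT360", "ACT/360"), ("ACT365", "ACT/365"), ("ACTACT", "ACT/ACT"), ("30360", "30/360"), ("BUS252", "BUS/252"), ("ACTUAL360", "ACT/360"), ("ACTUAL365", "ACT/365"), ("ACTUALACTUAL", "ACT/ACT"), ("ACTACTISDA", "ACT/ACT"), ("BONDBASIS", "30/360")] := by decide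
theorem pvS19 : (PySem.Dict.mk [("ACT360", "ACT/360"), ("ACT365", "ACT/365"), ("ACTACT", "ACT/ACT"), ("30360", "30/360"), ("BUS252", "BUS/252"), ("ACTUAL360", "ACT/360"), ("ACTUAL365", "ACT/365"), ("ACTUALACTUAL", "ACT/ACT"), ("ACTACTISDA", "ACT/ACT"), ("BONDBASIS", "30/360")]).insert "BUSINESS252" "BUS/252" = PySem.Dict.mk [("ACT360", "ACT/360"), ("ACT365", "ACT/365"), ("ACTACT", "ACT/ACT"), ("30360", "30/360"), ("BUS252", "BUS/252"), ("ACTUAL360", "ACT/360"), ("ACTUAL365", "ACT/365"), ("ACTUALACTUAL", "ACT/ACT"), ("ACTACTISDA", "ACT/ACT"), ("BONDBASIS", "30/360"), ("BUSINESS252", "BUS/252")] := by decide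

theorem pvT1 : (PySem.Dict.empty).insert "ACT360" "ACT/360" = PySem.Dict.mk [("ACT360", "ACT/360")] := by decide
theorem pvT2 : (PySem.Dict.mk [("ACT360", "ACT/360")]).insert "ACTUAL360" "ACT/360" = PySem.Dict.mk [("ACT360", "ACT/360"), ("ACTUAL360", "ACT/360")] := by decide
theorem pvT3 : (PySem.Dict.mk [("ACT360", "ACT/360"), ("ACTUAL360", "ACT/360")]).insert "ACTUAL/360" "ACT/360" = PySem.Dict.mk [("ACT360", "ACT/360"), ("ACTUAL360", "ACT/360"), ("ACTUAL/360", "ACT/360")] := by decide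
theorem pvT4 : (PySem.Dict.mk [("ACT360", "ACT/360"), ("ACTUAL360", "ACT/360"), ("ACTUAL/360", "ACT/360")]).insert "ACT365" "ACT/365" = PySem.Dict.mk [("ACT360", "ACT/360"), ("ACTUAL360", "ACT/360"), ("ACTUAL/360", "ACT/360"), ("ACT365", "ACT/365")] := by decide
theorem pvT5 : (PySem.Dict.mk [("ACT360", "ACT/360"), ("ACTUAL360", "ACT/360"), ("ACTUAL/360", "ACT/360"), ("ACT365", "ACT/365")]).insert "ACTUAL365" "ACT/365" = PySem.Dict.mk [("ACT360", "ACT/360"), ("ACTUAL360", "ACT/360"), ("ACTUAL/360", "ACT/360"), ("ACT365", "ACT/365"), ("ACTUAL365", "ACT/365")] := by decide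
theorem pvT6 : (PySem.Dict.mk [("ACT360", "ACT/360"), ("ACTUAL360", "ACT/360"), ("ACTUAL/360", "ACT/360"), ("ACT365", "ACT/365"), ("ACTUAL365", "ACT/365")]).insert "ACTUAL/365" "ACT/365" = PySem.Dict.mk [("ACT360", "ACT/360"), ("ACTUAL360", "ACT/360"), ("ACTUAL/360", "ACT/360"), ("ACT365", "ACT/365"), ("ACTUAL365", "ACT/365"), ("ACTUAL/365", "ACT/365")] := by decide
theorem pvT7 : (PySem.Dict.mk [("ACT360", "ACT/360"), ("ACTUAL360", "ACT/360"), ("ACTUAL/360", "ACT/360"), ("ACT365", "ACT/365"), ("ACTUAL365", "ACT/365"), ("ACTUAL/365", "ACT/365")]).insert "ACTACT" "ACT/ACT" = PySem.Dict.mk [("ACT360", "ACT/360"), ("ACTUAL360", "ACT/360"), ("ACTUAL/360", "ACT/360"), ("ACT365", "ACT/365"), ("ACTUAL365", "ACT/365"), ("ACTUAL/365", "ACT/365"), ("ACTACT", "ACT/ACT")] := by decide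
theorem pvT8 : (PySem.Dict.mk [("ACT360", "ACT/360"), ("ACTUAL360", "ACT/360"), ("ACTUAL/360", "ACT/360"), ("ACT365", "ACT/365"), ("ACTUAL365", "ACT/365"), ("ACTUAL/365", "ACT/365"), ("ACTACT", "ACT/ACT")]).insert "ACTUALACTUAL" "ACT/ACT" = PySem.Dict.mk [("ACT360", "ACT/360"), ("ACTUAL360", "ACT/360"), ("ACTUAL/360", "ACT/360"), ("ACT365", "ACT/365"), ("ACTUAL365", "ACT/365"), ("ACTUAL/365", "ACT/365"), ("ACTACT", "ACT/ACT"), ("ACTUALACTUAL", "ACT/ACT")] := by decide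
theorem pvT9 : (PySem.Dict.mk [("ACT360", "ACT/360"), ("ACTUAL360", "ACT/360"), ("ACTUAL/360", "ACT/360"), ("ACT365", "ACT/365"), ("ACTUAL365", "ACT/365"), ("ACTUAL/365", "ACT/365"), ("ACTACT", "ACT/ACT"), ("ACTUALACTUAL", "ACT/ACT")]).insert "ACTUAL/ACTUAL" "ACT/ACT" = PySem.Dict.mk [("ACT360", "ACT/360"), ("ACTUAL360", "ACT/360"), ("ACTUAL/360", "ACT/360"), ("ACT365", "ACT/365"), ("ACTUAL365", "ACT/365"), ("ACTUAL/365", "ACT/365"), ("ACTACT", "ACT/ACT"), ("ACTUALACTUAL", "ACT/ACT"), ("ACTUAL/ACTUAL", "ACT/ACT")] := by decide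
theorem pvT10 : (PySem.Dict.mk [("ACT360", "ACT/360"), ("ACTUAL360", "ACT/360"), ("ACTUAL/360", "ACT/360"), ("ACT365", "ACT/365"), ("ACTUAL365", "ACT/365"), ("ACTUAL/365", "ACT/365"), ("ACTACT", "ACT/ACT"), ("ACTUALACTUAL", "ACT/ACT"), ("ACTUAL/ACTUAL", "ACT/ACT")]).insert "ACTACTISDA" "ACT/ACT" = PySem.Dict.mk [("ACT360", "ACT/360"), ("ACTUAL360", "ACT/360"), ("ACTUAL/360", "ACT/360"), ("ACT365", "ACT/365"), ("ACTUAL365", "ACT/365"), ("ACTUAL/365", "ACT/365"), ("ACTACT", "ACT/ACT"), ("ACTUALACTUAL", "ACT/ACT"), ("ACTUAL/ACTUAL", "ACT/ACT"), ("ACTACTISDA", "ACT/ACT")] := by decide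
theorem pvT11 : (PySem.Dict.mk [("ACT360", "ACT/360"), ("ACTUAL360", "ACT/360"), ("ACTUAL/360", "ACT/360"), ("ACT365", "ACT/365"), ("ACTUAL365", "ACT/365"), ("ACTUAL/365", "ACT/365"), ("ACTACT", "ACT/ACT"), ("ACTUALACTUAL", "ACT/ACT"), ("ACTUAL/ACTUAL", "ACT/ACT"), ("ACTACTISDA", "ACT/ACT")]).insert "30360" "30/360" = PySem.Dict.mk [("ACT360", "ACT/360"), ("ACTUAL360", "ACT/360"), ("ACTUAL/360", "ACT/360"), ("ACT365", "ACT/365"), ("ACTUAL365", "ACT/365"), ("ACTUAL/365", "ACT/365"), ("ACTACT", "ACT/ACT"), ("ACTUALACTUAL", "ACT/ACT"), ("ACTUAL/ACTUAL", "ACT/ACT"), ("ACTACTISDA", "ACT/ACT"), ("30360", "30/360")] := by decide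
theorem pvT12 : (PySem.Dict.mk [("ACT360", "ACT/360"), ("ACTUAL360", "ACT/360"), ("ACTUAL/360", "ACT/360"), ("ACT365", "ACT/365"), ("ACTUAL365", "ACT/365"), ("ACTUAL/365", "ACT/365"), ("ACTACT", "ACT/ACT"), ("ACTUALACTUAL", "ACT/ACT"), ("ACTUAL/ACTUAL", "ACT/ACT"), ("ACTACTISDA", "ACT/ACT"), ("30360", "30/360")]).insert "BONDBASIS" "30/360" = PySem.Dict.mk [("ACT360", "ACT/360"), ("ACTUAL360", "ACT/360"), ("ACTUAL/360", "ACT/360"), ("ACT365", "ACT/365"), ("ACTUAL365", "ACT/365"), ("ACTUAL/365", "ACT/365"), ("ACTACT", "ACT/ACT"), ("ACTUALACTUAL", "ACT/ACT"), ("ACTUAL/ACTUAL", "ACT/ACT"), ("ACTACTISDA", "ACT/ACT"), ("30360", "30/360"), ("BONDBASIS", "30/360")] := by decide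
theorem pvT13 : (PySem.Dict.mk [("ACT360", "ACT/360"), ("ACTUAL360", "ACT/360"), ("ACTUAL/360", "ACT/360"), ("ACT365", "ACT/365"), ("ACTUAL365", "ACT/365"), ("ACTUAL/365", "ACT/365"), ("ACTACT", "ACT/ACT"), ("ACTUALACTUAL", "ACT/ACT"), ("ACTUAL/ACTUAL", "ACT/ACT"), ("ACTACTISDA", "ACT/ACT"), ("30360", "30/360"), ("BONDBASIS", "30/360")]).insert "BUS252" "BUS/252" = PySem.Dict.mk [("ACT360", "ACT/360"), ("ACTUAL360", "ACT/360"), ("ACTUAL/360", "ACT/360"), ("ACT365", "ACT/365"), ("ACTUAL365", "ACT/365"), ("ACTUAL/365", "ACT/365"), ("ACTACT", "ACT/ACT"), ("ACTUALACTUAL", "ACT/ACT"), ("ACTUAL/ACTUAL", "ACT/ACT"), ("ACTACTISDA", "ACT/ACT"), ("30360", "30/360"), ("BONDBASIS", "30/360"), ("BUS252", "BUS/252")] := by decide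
theorem pvT14 : (PySem.Dict.mk [("ACT360", "ACT/360"), ("ACTUAL360", "ACT/360"), ("ACTUAL/360", "ACT/360"), ("ACT365", "ACT/365"), ("ACTUAL365", "ACT/365"), ("ACTUAL/365", "ACT/365"), ("ACTACT", "ACT/ACT"), ("ACTUALACTUAL", "ACT/ACT"), ("ACTUAL/ACTUAL", "ACT/ACT"), ("ACTACTISDA", "ACT/ACT"), ("30360", "30/360"), ("BONDBASIS", "30/360"), ("BUS252", "BUS/252")]).insert "BUSINESS252" "BUS/252" = PySem.Dict.mk [("ACT360", "ACT/360"), ("ACTUAL360", "ACT/360"), ("ACTUAL/360", "ACT/360"), ("ACT365", "ACT/365"), ("ACTUAL365", "ACT/365"), ("ACTUAL/365", "ACT/365"), ("ACTACT", "ACT/ACT"), ("ACTUALACTUAL", "ACT/ACT"), ("ACTUAL/ACTUAL", "ACT/ACT"), ("ACTACTISDA", "ACT/ACT"), ("30360", "30/360"), ("BONDBASIS", "30/360"), ("BUS252", "BUS/252"), ("BUSINESS252", "BUS/252")] := by decide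
theorem pvAliasDict_eq : PySem.Dict.ofList pvAliases = PySem.Dict.mk [("ACT360", "ACT/360"), ("ACTUAL360", "ACT/360"), ("ACTUAL/360", "ACT/360"), ("ACT365", "ACT/365"), ("ACTUAL365", "ACT/365"), ("ACTUAL/365", "ACT/365"), ("ACTACT", "ACT/ACT"), ("ACTUALACTUAL", "ACT/ACT"), ("ACTUAL/ACTUAL", "ACT/ACT"), ("ACTACTISDA", "ACT/ACT"), ("30360", "30/360"), ("BONDBASIS", "30/360"), ("BUS252", "BUS/252"), ("BUSINESS252", "BUS/252")] := by
  unfold pvAliases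
  simp only [PySem.Dict.ofList, PySem.Dict.update, List.foldl, pvT1, pvT2, pvT3, pvT4, pvT5, pvT6, pvT7, pvT8, pvT9, pvT10, pvT11, pvT12, pvT13, pvT14]

-- the precomputed table of B, evaluated to a literal dict once
theorem pvLookupB_eq : pvLookupB = PySem.Dict.mk [("ACT360", "ACT/360"), ("ACT365", "ACT/365"), ("ACTACT", "ACT/ACT"), ("30360", "30/360"), ("BUS252", "BUS/252"), ("ACTUAL360", "ACT/360"), ("ACTUAL365", "ACT/365"), ("ACTUALACTUAL", "ACT/ACT"), ("ACTACTISDA", "ACT/ACT"), ("BONDBASIS", "30/360"), ("BUSINESS252", "BUS/252")] := by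
  unfold pvLookupB pvSupported pvAliases
  simp only [List.foldl, pvN1, pvN2, pvN3, pvN4, pvN5, pvN6, pvN7, pvN8, pvN9, pvN10, pvN11, pvN12, pvN13, pvN14, pvN15, pvN16, pvN17, pvN18, pvN19,
    pvS1, pvS2, pvS3, pvS4, pvS5, pvS6, pvS7, pvS8, pvS9, pvS10, pvS11, pvS12, pvS13, pvS14, pvS15, pvS16, pvS17, pvS18, pvS19]

-- if A's first loop hits, the key is literally one of the five canonical strings
theorem pvLoop1_some (key c : String) (h : pvLoop1 key pvSupported = some c) :
    key = c ∧ c ∈ pvSupported := by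
  simp only [pvSupported, pvLoop1] at h ⊢
  repeat' split at h
  all_goals simp_all

-- B's port with its table replaced by the evaluated literal
theorem pvAlt_eq (s : String) : resolve_convention_py_alt s =
    (match (PySem.Dict.mk [("ACT360", "ACT/360"), ("ACT365", "ACT/365"), ("ACTACT", "ACT/ACT"), ("30360", "30/360"), ("BUS252", "BUS/252"), ("ACTUAL360", "ACT/360"), ("ACTUAL365", "ACT/365"), ("ACTUALACTUAL", "ACT/ACT"), ("ACTACTISDA", "ACT/ACT"), ("BONDBASIS", "30/360"), ("BUSINESS252", "BUS/252")]).get?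
        (PySem.Str.replace (PySem.Str.replace (PySem.Str.upper (PySem.Str.strip s)) "/" "") " " "") with
     | some c => c | none => "") := by
  unfold resolve_convention_py_alt
  rw [pvLookupB_eq]

-- on every normalized key admitted by Pre_, A's fallback chain and B's table agree
theorem pvStage2_eq_lookup (n : String)
    (h : n ∈ (["ACT360", "ACTUAL360", "ACT365", "ACTUAL365", "ACTACT", "ACTUALACTUAL",
      "ACTACTISDA", "30360", "BONDBASIS", "BUS252", "BUSINESS252"] : List String)) :
    pvStage2 n = (match (PySem.Dict.mk [("ACT360", "ACT/360"), ("ACT365", "ACT/365"), ("ACTACT", "ACT/ACT"), ("30360", "30/360"), ("BUS252", "BUS/252"), ("ACTUAL360", "ACT/360"), ("ACTUAL365", "ACT/365"), ("ACTUALACTUAL", "ACT/ACT"), ("ACTACTISDA", "ACT/ACT"), ("BONDBASIS", "30/360"), ("BUSINESS252", "BUS/252")]).get? n with | some c => c | none => "") := by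
  unfold pvStage2
  rw [pvAliasDict_eq]
  fin_cases h <;> decide

-- ===== VERDICT (by name: the statement is the Claim_ definition above) =====
theorem resolve_convention_py_spec : Claim_equal_resolve_convention_py := by
  intro s _ hpre
  show resolve_convention_py s = resolve_convention_py_alt s
  rw [pvAlt_eq]
  unfold resolve_convention_py
  cases h1 : pvLoop1 (PySem.Str.upper (PySem.Str.strip s)) pvSupported with
  | none =>
      simp only [h1]
      have e1 : pvNormalize (PySem.Str.upper (PySem.Str.strip s)) =
          PySem.Str.replace (PySem.Str.replace (PySem.Str.upper (PySem.Str.strip s)) "/" "") " " "" := rfl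
      rw [e1]
      exact pvStage2_eq_lookup
        (PySem.Str.replace (PySem.Str.replace (PySem.Str.upper (PySem.Str.strip s)) "/" "") " " "") hpre
  | some c =>
      simp only [h1]
      obtain ⟨hk, hc⟩ := pvLoop1_some _ _ h1
      fin_cases hc <;> · rw [hk]; decide
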